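-- pv_equiv track=rewrite | github.com/miliar/Code_Jam_Webscraper | solutions_python/Problem_201/191.py | solve_slow
-- ===== SOURCE A (Python) =====
-- import heapq
--
-- def solve_slow(n, k):
--     q = []
--     heapq.heappush(q, -n)
--     for __ in range(k):
--         n = -heapq.heappop(q)
--         heapq.heappush(q, -(n // 2))
--         heapq.heappush(q, -((n - 1) // 2))
--     return n // 2, (n - 1) // 2
-- ===== SOURCE B (Python) =====
-- def solve_slow(n, k):
--     # Level-bulk simulation: a dict size -> count replaces the heap; all copies of a
--     # positive maximum are split at once, and the fixed points 0/-1 are short-circuited.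
--     counts = {n: 1}
--     v, rem = n, k
--     while rem > 0:
--         m = max(counts)
--         if m == 0 or m == -1:
--             v, rem = m, 0
--             continue
--         c = counts.pop(m)
--         if m >= 1:
--             if rem <= c:
--                 v, rem = m, 0
--             else:
--                 rem -= c
--                 counts[m // 2] = counts.get(m // 2, 0) + c
--                 counts[(m - 1) // 2] = counts.get((m - 1) // 2, 0) + c
--         else:
--             rem -= 1
--             v = m
--             if c > 1:
--                 counts[m] = c - 1
--             counts[m // 2] = counts.get(m // 2, 0) + 1
--             counts[(m - 1) // 2] = counts.get((m - 1) // 2, 0) + 1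
--     return v // 2, (v - 1) // 2
-- ===== Notes on version B (the rewrite author's own statement) =====
-- stated objective: faster
-- what changed: Replaces the heap that pops one pile per iteration (k pops, O(k log k)) with a size->count dict that pops a whole level of equal maximal piles in one arithmetic step and short-circuits the fixed-point sizes 0 and -1, so the number of loop iterations is logarithmic instead of linear in k.
import Mathlib
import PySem

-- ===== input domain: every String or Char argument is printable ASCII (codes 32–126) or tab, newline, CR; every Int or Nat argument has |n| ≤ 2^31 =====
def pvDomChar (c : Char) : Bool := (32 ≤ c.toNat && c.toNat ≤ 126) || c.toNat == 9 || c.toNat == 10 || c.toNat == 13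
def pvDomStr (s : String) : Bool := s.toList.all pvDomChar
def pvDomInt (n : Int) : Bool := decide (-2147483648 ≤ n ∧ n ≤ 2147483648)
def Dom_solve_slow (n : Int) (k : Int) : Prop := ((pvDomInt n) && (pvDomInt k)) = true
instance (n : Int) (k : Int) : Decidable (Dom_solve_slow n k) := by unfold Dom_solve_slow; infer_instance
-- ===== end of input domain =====

-- B replaces A's one-pop-at-a-time heap with a size→count dict that splits whole levels at once
-- and short-circuits the fixed-point sizes 0/-1 (measured faster at the large sizes).

-- ===== PORT A =====
-- heapq is modelled by a plain list: heappop returns the minimum element (exactly the value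
-- Python's heappop returns) and removes one occurrence of it; heappush conses.  The element
-- multiset and every popped VALUE coincide with Python's heap at each step.
def pyHeapPop (q : List Int) : Int × List Int :=
  match q.min? with
  | some m => (m, q.erase m)
  | none => (0, q)  -- unreachable: the heap is never empty

def loopA : Nat → Int → List Int → Int
  | 0, n, _ => n
  | t+1, _, q =>
      let p := pyHeapPop q
      let n := -p.1
      loopA t n ((-(PySem.Int.floordiv (n-1) 2)) :: (-(PySem.Int.floordiv n 2)) :: p.2)

def solve_slow (n : Int) (k : Int) : List Int :=
  let r := loopA k.toNat n [-n]
  [PySem.Int.floordiv r 2, PySem.Int.floordiv (r-1) 2]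

-- ===== PORT B =====
-- fuel = k.toNat + 1 bounds the loop iterations: every iteration either exits or decreases rem
-- by at least 1 (counts are ≥ 1), so fuel never runs out on a reachable state.
def loopB : Nat → Int → PySem.Dict Int Int → Int → Int
  | 0, _, _, v => v
  | fuel+1, rem, d, v =>
    if rem ≤ 0 then v else
    match PySem.List.max? d.keys (fun x => x) with  -- max(counts): keys are distinct
    | none => v  -- unreachable: counts is never empty
    | some m =>
      if m = 0 ∨ m = -1 then m
      else
        let c := PySem.Dict.getD d m 0  -- counts.pop(m): m is a key, default unreachable
        let d0 := PySem.Dict.erase d m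
        if 1 ≤ m then
          if rem ≤ c then m
          else
            let h1 := PySem.Int.floordiv m 2
            let h2 := PySem.Int.floordiv (m-1) 2
            let d1 := PySem.Dict.insert d0 h1 (PySem.Dict.getD d0 h1 0 + c)
            let d2 := PySem.Dict.insert d1 h2 (PySem.Dict.getD d1 h2 0 + c)
            loopB fuel (rem - c) d2 v
        else
          let h1 := PySem.Int.floordiv m 2
          let h2 := PySem.Int.floordiv (m-1) 2
          let d1 := if 1 < c then PySem.Dict.insert d0 m (c-1) else d0
          let d2 := PySem.Dict.insert d1 h1 (PySem.Dict.getD d1 h1 0 + 1)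
          let d3 := PySem.Dict.insert d2 h2 (PySem.Dict.getD d2 h2 0 + 1)
          loopB fuel (rem - 1) d3 m

def solve_slow_alt (n : Int) (k : Int) : List Int :=
  let r := loopB (k.toNat + 1) k (PySem.Dict.ofList [(n, 1)]) n
  [PySem.Int.floordiv r 2, PySem.Int.floordiv (r-1) 2]

-- ===== PRECONDITION & SPEC =====
def Spec_solve_slow (n : Int) (k : Int) (out : List Int) : Prop := out = solve_slow_alt n k
instance (n : Int) (k : Int) (out : List Int) : Decidable (Spec_solve_slow n k out) := by unfold Spec_solve_slow; infer_instance

-- ===== CLAIM (what is proved, stated in full; the proofs are below) =====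
def Claim_equal_solve_slow : Prop := ∀ (n : Int) (k : Int), Dom_solve_slow n k → Spec_solve_slow n k (solve_slow n k)

-- ===== LEMMAS AND PROOFS =====

-- the multiset of pile sizes held by A's heap (heap stores negated sizes)
def mOf (q : List Int) : Multiset Int := ↑(q.map (fun z => -z))

-- the multiset of pile sizes held by B's dict (key repeated count times)
def msOf : List (Int × Int) → Multiset Int
  | [] => 0
  | p :: t => Multiset.replicate p.2.toNat p.1 + msOf t

def dOf (d : PySem.Dict Int Int) : Multiset Int := msOf d.items

-- simulation invariant
def SimInv (q : List Int) (d : PySem.Dict Int Int) : Prop :=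
  mOf q = dOf d ∧ (∀ p ∈ d.items, 1 ≤ p.2) ∧ d.items ≠ [] ∧ (d.items.map Prod.fst).Nodup

lemma mem_msOf_of_pos {l : List (Int × Int)} (hpos : ∀ p ∈ l, (1:Int) ≤ p.2) {x : Int} :
    x ∈ msOf l ↔ x ∈ l.map Prod.fst := by
  induction l with
  | nil => simp [msOf]
  | cons p t ih =>
    have hp : (1:Int) ≤ p.2 := hpos p (by simp)
    have ht : ∀ r ∈ t, (1:Int) ≤ r.2 := fun r hr => hpos r (by simp [hr])
    have hz : p.2.toNat ≠ 0 := by omega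
    simp [msOf, Multiset.mem_replicate, ih ht, hz]

lemma replicate_le_msOf {l : List (Int × Int)} {m c : Int} (hmem : (m, c) ∈ l) :
    Multiset.replicate c.toNat m ≤ msOf l := by
  induction l with
  | nil => simp at hmem
  | cons p t ih =>
    rcases List.mem_cons.mp hmem with h | h
    · rw [msOf, ← h]; exact self_le_add_right _ _
    · exact le_trans (ih h) (self_le_add_left _ _)

lemma count_msOf_zero {t : List (Int × Int)} {m : Int} (hm : m ∉ t.map Prod.fst) :
    (msOf t).count m = 0 := by
  induction t with
  | nil => simp [msOf]
  | cons p t ih =>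
    simp only [List.map_cons, List.mem_cons, not_or] at hm
    simp [msOf, Multiset.count_replicate, Ne.symm hm.1, ih hm.2]

lemma count_msOf {l : List (Int × Int)} (hnd : (l.map Prod.fst).Nodup) {m c : Int}
    (hmem : (m, c) ∈ l) : (msOf l).count m = c.toNat := by
  induction l with
  | nil => simp at hmem
  | cons p t ih =>
    simp only [List.map_cons, List.nodup_cons] at hnd
    rcases List.mem_cons.mp hmem with h | h
    · rw [← h] at hnd ⊢
      simp [msOf, count_msOf_zero hnd.1]
    · have hne : p.1 ≠ m := by
        intro he; exact hnd.1 (he ▸ List.mem_map.mpr ⟨(m, c), h, rfl⟩)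
      simp [msOf, Multiset.count_replicate, ih hnd.2 h]
      exact fun he => absurd he hne

lemma msOf_filter_ne {l : List (Int × Int)} {m : Int} (hm : m ∉ l.map Prod.fst) :
    l.filter (fun p => !p.1 == m) = l := by
  induction l with
  | nil => rfl
  | cons p t ih =>
    simp only [List.map_cons, List.mem_cons, not_or] at hm
    simp [Ne.symm hm.1, ih hm.2]

lemma msOf_erase {l : List (Int × Int)} (hnd : (l.map Prod.fst).Nodup) {m c : Int}
    (hmem : (m, c) ∈ l) :
    msOf (l.filter (fun p => !p.1 == m)) = msOf l - Multiset.replicate c.toNat m := by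
  induction l with
  | nil => simp at hmem
  | cons p t ih =>
    simp only [List.map_cons, List.nodup_cons] at hnd
    by_cases hpk : p.1 = m
    · have hpe : p = (m, c) := by
        rcases List.mem_cons.mp hmem with h | h
        · exact h.symm
        · exact absurd (hpk ▸ List.mem_map.mpr ⟨(m, c), h, rfl⟩) hnd.1
      subst hpe
      rw [List.filter_cons, if_neg (by simp), msOf_filter_ne (by simpa using hnd.1)]
      simp [msOf, add_tsub_cancel_left]
    · have hmt : (m, c) ∈ t := by
        rcases List.mem_cons.mp hmem with h | h
        · exact absurd (by rw [← h]) hpk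
        · exact h
      rw [List.filter_cons, if_pos (by simp [hpk])]
      rw [msOf, msOf, ih hnd.2 hmt,
        ← add_tsub_assoc_of_le (replicate_le_msOf hmt)]

lemma not_mem_keys_filter (l : List (Int × Int)) (m : Int) :
    m ∉ (l.filter (fun p => !p.1 == m)).map Prod.fst := by
  simp only [List.mem_map, List.mem_filter]
  rintro ⟨p, ⟨-, hp⟩, rfl⟩
  simp at hp

lemma msOf_append (l1 l2 : List (Int × Int)) : msOf (l1 ++ l2) = msOf l1 + msOf l2 := by
  induction l1 with
  | nil => simp [msOf]
  | cons p t ih => simp [msOf, ih, add_assoc]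

lemma map_if_id {l : List (Int × Int)} {k : Int} (hk : k ∉ l.map Prod.fst) {w : Int} :
    l.map (fun p => if p.1 == k then (k, w) else p) = l := by
  induction l with
  | nil => rfl
  | cons p t ih =>
    simp only [List.map_cons, List.mem_cons, not_or] at hk
    rw [List.map_cons, if_neg (by simp [Ne.symm hk.1]), ih hk.2]

lemma msOf_mapset {l : List (Int × Int)} (hnd : (l.map Prod.fst).Nodup) {k v0 w : Int}
    (hmem : (k, v0) ∈ l) :
    msOf (l.map (fun p => if p.1 == k then (k, w) else p))
      = msOf l - Multiset.replicate v0.toNat k + Multiset.replicate w.toNat k := by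
  induction l with
  | nil => simp at hmem
  | cons p t ih =>
    simp only [List.map_cons, List.nodup_cons] at hnd
    by_cases hpk : p.1 = k
    · have hpe : p = (k, v0) := by
        rcases List.mem_cons.mp hmem with h | h
        · exact h.symm
        · exact absurd (hpk ▸ List.mem_map.mpr ⟨(k, v0), h, rfl⟩) hnd.1
      subst hpe
      rw [List.map_cons, if_pos (by simp), map_if_id (by simpa using hnd.1)]
      simp only [msOf, add_tsub_cancel_left]
      exact add_comm _ _
    · have hmt : (k, v0) ∈ t := by
        rcases List.mem_cons.mp hmem with h | h
        · exact absurd (by rw [← h]) hpk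
        · exact h
      rw [List.map_cons, if_neg (by simp [hpk]), msOf, msOf, ih hnd.2 hmt,
        ← add_assoc, ← add_tsub_assoc_of_le (replicate_le_msOf hmt)]

lemma keys_eq_map_fst (d : PySem.Dict Int Int) : d.keys = d.items.map Prod.fst := rfl

lemma getD_nonneg {d : PySem.Dict Int Int} (hpos : ∀ p ∈ d.items, (0:Int) ≤ p.2) (k : Int) :
    0 ≤ PySem.Dict.getD d k 0 := by
  cases hf : PySem.Dict.get? d k with
  | none => simp [PySem.Dict.getD, hf]
  | some v =>
    rw [PySem.Dict.getD_of_get?_eq_some d 0 hf]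
    exact hpos _ (PySem.Dict.mem_items_of_get?_eq_some d hf)

lemma dOf_insert_add {d : PySem.Dict Int Int} (hnd : (d.items.map Prod.fst).Nodup)
    (hpos : ∀ p ∈ d.items, (0:Int) ≤ p.2) {k inc : Int} (hinc : 0 ≤ inc) :
    dOf (PySem.Dict.insert d k (PySem.Dict.getD d k 0 + inc))
      = dOf d + Multiset.replicate inc.toNat k := by
  cases hc : d.contains k with
  | false =>
    rw [dOf, PySem.Dict.items_insert_of_not_contains d _ hc, msOf_append,
      PySem.Dict.getD_of_not_contains d 0 hc]
    simp [msOf, dOf]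
  | true =>
    obtain ⟨v0, hget⟩ : ∃ v0, d.get? k = some v0 := by
      rw [PySem.Dict.contains_eq_isSome_get?] at hc
      exact Option.isSome_iff_exists.mp hc
    have hmem : (k, v0) ∈ d.items := PySem.Dict.mem_items_of_get?_eq_some d hget
    have hv0 : 0 ≤ v0 := hpos _ hmem
    rw [dOf, PySem.Dict.items_insert_of_contains d _ hc,
      msOf_mapset hnd hmem, PySem.Dict.getD_of_get?_eq_some d 0 hget,
      Int.toNat_add hv0 hinc, Multiset.replicate_add, ← add_assoc,
      tsub_add_cancel_of_le (replicate_le_msOf hmem)]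
    rfl

lemma dOf_insert_fresh {d : PySem.Dict Int Int} {k : Int}
    (hk : k ∉ d.items.map Prod.fst) (w : Int) :
    dOf (PySem.Dict.insert d k w) = dOf d + Multiset.replicate w.toNat k := by
  have hc : d.contains k = false := by
    rw [PySem.Dict.contains_eq_decide_mem_keys, keys_eq_map_fst]
    simpa using hk
  rw [dOf, PySem.Dict.items_insert_of_not_contains d _ hc, msOf_append]
  simp [msOf, dOf]

lemma items_pos_insert {d : PySem.Dict Int Int} (hpos : ∀ p ∈ d.items, (1:Int) ≤ p.2)
    {k w : Int} (hw : 1 ≤ w) : ∀ p ∈ (PySem.Dict.insert d k w).items, (1:Int) ≤ p.2 := by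
  intro p hp
  rcases (PySem.Dict.mem_items_insert d k w p).mp hp with h | h
  · rw [h]; exact hw
  · exact hpos p h.1

lemma nodup_keys_erase {d : PySem.Dict Int Int} (hnd : (d.items.map Prod.fst).Nodup) (m : Int) :
    ((PySem.Dict.erase d m).items.map Prod.fst).Nodup := by
  exact hnd.sublist (List.Sublist.map _ List.filter_sublist)

lemma map_neg_erase (q : List Int) (a : Int) :
    (q.erase a).map (fun z => -z) = (q.map (fun z => -z)).erase (-a) := by
  induction q with
  | nil => rfl
  | cons b t ih =>
    by_cases hba : b = a
    · subst hba; simp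
    · rw [List.erase_cons_tail (by simp [hba]), List.map_cons, List.map_cons,
        List.erase_cons_tail (by simp [hba]), ih]

-- A pops exactly the maximum pile size
lemma stepA {q : List Int} {M : Multiset Int} {m : Int} (hq : mOf q = M) (hmem : m ∈ M)
    (hmax : ∀ y ∈ M, y ≤ m) (t : Nat) (x : Int) :
    loopA (t+1) x q
      = loopA t m ((-(PySem.Int.floordiv (m-1) 2)) :: (-(PySem.Int.floordiv m 2)) :: q.erase (-m))
    ∧ mOf ((-(PySem.Int.floordiv (m-1) 2)) :: (-(PySem.Int.floordiv m 2)) :: q.erase (-m))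
      = (PySem.Int.floordiv (m-1) 2) ::ₘ (PySem.Int.floordiv m 2) ::ₘ M.erase m := by
  have hmq : -m ∈ q := by
    rw [mOf] at hq
    have : m ∈ (q.map (fun z => -z)) := by rw [← Multiset.mem_coe, hq]; exact hmem
    obtain ⟨z, hz, hze⟩ := List.mem_map.mp this
    rwa [show -m = z by omega]
  have hlb : ∀ b ∈ q, -m ≤ b := by
    intro b hb
    have : -b ∈ M := by
      rw [← hq, mOf, Multiset.mem_coe]
      exact List.mem_map.mpr ⟨b, hb, rfl⟩
    have := hmax _ this
    omega
  have hmin : q.min? = some (-m) := List.min?_eq_some_iff.mpr ⟨hmq, hlb⟩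
  constructor
  · conv_lhs => rw [loopA]
    simp only [pyHeapPop, hmin, neg_neg]
  · rw [mOf, List.map_cons, List.map_cons, map_neg_erase, neg_neg, neg_neg, neg_neg]
    rw [← Multiset.cons_coe, ← Multiset.cons_coe, ← Multiset.coe_erase, show (↑(List.map (fun z => -z) q) : Multiset Int) = M from hq]

-- once the maximum is 0 or -1 it stays, and every later pop returns it
lemma fixA : ∀ (t : Nat) (x : Int) (q : List Int) (M : Multiset Int) (m : Int),
    mOf q = M → m ∈ M → (∀ y ∈ M, y ≤ m) → (m = 0 ∨ m = -1) →
    loopA (t+1) x q = m := by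
  intro t
  induction t with
  | zero =>
    intro x q M m hq hmem hmax _
    rw [(stepA hq hmem hmax 0 x).1, loopA]
  | succ t ih =>
    intro x q M m hq hmem hmax hm01
    obtain ⟨h1, h2⟩ := stepA hq hmem hmax (t+1) x
    rw [h1]
    have hf1 : PySem.Int.floordiv m 2 = m := by
      rcases hm01 with h | h <;> subst h <;> decide
    have hf2 : PySem.Int.floordiv (m-1) 2 = -1 := by
      rcases hm01 with h | h <;> subst h <;> decide
    refine ih m _ _ m h2 ?_ ?_ hm01
    · rw [hf1]; exact Multiset.mem_cons_of_mem (Multiset.mem_cons_self _ _)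
    · intro y hy
      rcases Multiset.mem_cons.mp hy with h | hy'
      · subst h; rw [hf2]; rcases hm01 with h | h <;> omega
      rcases Multiset.mem_cons.mp hy' with h | hy''
      · subst h; rw [hf1]
      · exact hmax _ (Multiset.mem_of_mem_erase hy'')

-- j+1 consecutive pops of a positive maximum m present with multiplicity ≥ j+1
lemma bulkA : ∀ (j t : Nat) (x : Int) (q : List Int) (M : Multiset Int) (m : Int),
    mOf q = M → (∀ y ∈ M, y ≤ m) → (j+1) ≤ M.count m → 1 ≤ m →
    ∃ q', loopA ((j+1) + t) x q = loopA t m q' ∧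
      mOf q' = (M - Multiset.replicate (j+1) m) + Multiset.replicate (j+1) (PySem.Int.floordiv m 2)
                 + Multiset.replicate (j+1) (PySem.Int.floordiv (m-1) 2) := by
  intro j
  induction j with
  | zero =>
    intro t x q M m hq hmax hcnt hm
    have hmem : m ∈ M := Multiset.count_pos.mp (by omega)
    have hlt1 : PySem.Int.floordiv m 2 < m :=
      (PySem.Int.floordiv_lt_iff_lt_mul (by omega)).mpr (by omega)
    have hlt2 : PySem.Int.floordiv (m-1) 2 < m :=
      (PySem.Int.floordiv_lt_iff_lt_mul (by omega)).mpr (by omega)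
    obtain ⟨h1, h2⟩ := stepA hq hmem hmax t x
    refine ⟨_, by rw [show 0+1+t = t+1 from by omega]; exact h1, ?_⟩
    rw [h2, Multiset.ext]
    intro b
    rw [Multiset.count_cons, Multiset.count_cons, Multiset.count_add, Multiset.count_add,
      Multiset.count_sub, Multiset.count_replicate, Multiset.count_replicate,
      Multiset.count_replicate]
    by_cases hb1 : b = m
    · subst hb1; rw [Multiset.count_erase_self]; split_ifs <;> omega
    · rw [Multiset.count_erase_of_ne hb1]; split_ifs <;> omega
  | succ j ih =>
    intro t x q M m hq hmax hcnt hm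
    have hmem : m ∈ M := Multiset.count_pos.mp (by omega)
    have hlt1 : PySem.Int.floordiv m 2 < m :=
      (PySem.Int.floordiv_lt_iff_lt_mul (by omega)).mpr (by omega)
    have hlt2 : PySem.Int.floordiv (m-1) 2 < m :=
      (PySem.Int.floordiv_lt_iff_lt_mul (by omega)).mpr (by omega)
    obtain ⟨h1, h2⟩ := stepA hq hmem hmax (j+1+t) x
    have hcnt' : (j+1) ≤ Multiset.count m
        ((PySem.Int.floordiv (m-1) 2) ::ₘ (PySem.Int.floordiv m 2) ::ₘ M.erase m) := by
      rw [Multiset.count_cons, Multiset.count_cons, Multiset.count_erase_self,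
        if_neg (by omega), if_neg (by omega)]
      omega
    have hmax' : ∀ y ∈ ((PySem.Int.floordiv (m-1) 2) ::ₘ (PySem.Int.floordiv m 2) ::ₘ M.erase m), y ≤ m := by
      intro y hy
      rcases Multiset.mem_cons.mp hy with h | hy'
      · omega
      rcases Multiset.mem_cons.mp hy' with h | hy''
      · omega
      · exact hmax _ (Multiset.mem_of_mem_erase hy'')
    obtain ⟨q', hq1, hq2⟩ := ih t m _ _ m h2 hmax' hcnt' hm
    refine ⟨q', ?_, ?_⟩
    · rw [show j+1+1+t = (j+1+t)+1 from by omega, h1, hq1]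
    · rw [hq2, Multiset.ext]
      intro b
      rw [Multiset.count_add, Multiset.count_add, Multiset.count_add, Multiset.count_add,
        Multiset.count_sub, Multiset.count_sub, Multiset.count_cons, Multiset.count_cons]
      simp only [Multiset.count_replicate]
      by_cases hb1 : b = m
      · subst hb1; rw [Multiset.count_erase_self]; split_ifs <;> omega
      · rw [Multiset.count_erase_of_ne hb1]; split_ifs <;> omega

lemma loopB_done (f : Nat) (rem : Int) (d : PySem.Dict Int Int) (w : Int) (h : rem ≤ 0) :
    loopB f rem d w = w := by
  cases f with
  | zero => rfl
  | succ f => rw [loopB, if_pos h]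

-- main simulation: while the remaining count is positive, A's heap loop and B's dict loop agree
lemma sim : ∀ (fuel : Nat) (rem : Int) (q : List Int) (d : PySem.Dict Int Int) (v x : Int),
    SimInv q d → 0 < rem → rem.toNat < fuel →
    loopA rem.toNat x q = loopB fuel rem d v := by
  intro fuel
  induction fuel with
  | zero => intro rem q d v x _ _ h; omega
  | succ f ih =>
    intro rem q d v x hinv hrem hfuel
    obtain ⟨hqd, hpos, hne, hnd⟩ := hinv
    have hkeysne : d.keys ≠ [] := by
      rw [keys_eq_map_fst]; simpa using hne
    obtain ⟨m, hmaxeq⟩ : ∃ m, PySem.List.max? d.keys (fun x => x) = some m := by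
      cases hmx : PySem.List.max? d.keys (fun x => x) with
      | none => exact absurd ((PySem.List.max?_eq_none_iff _ _).mp hmx) hkeysne
      | some m => exact ⟨m, rfl⟩
    have hmk : m ∈ d.keys := PySem.List.max?_mem hmaxeq
    have hmaxk : ∀ y ∈ d.keys, y ≤ m := PySem.List.max?_isMax hmaxeq
    obtain ⟨⟨a, v0⟩, hp0, hf⟩ := List.mem_map.mp (show m ∈ d.items.map Prod.fst by rwa [← keys_eq_map_fst])
    simp only at hf
    subst hf
    have hndk : d.keys.Nodup := by rwa [keys_eq_map_fst]
    have hget : PySem.Dict.get? d a = some v0 := PySem.Dict.get?_of_mem_items d hp0 hndk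
    have hgetD : PySem.Dict.getD d a 0 = v0 := PySem.Dict.getD_of_get?_eq_some d 0 hget
    have hc1 : (1:Int) ≤ v0 := hpos _ hp0
    have hmM : a ∈ mOf q := by
      rw [hqd, dOf]
      exact (mem_msOf_of_pos hpos).mpr (by rwa [keys_eq_map_fst] at hmk)
    have hmaxM : ∀ y ∈ mOf q, y ≤ a := by
      intro y hy
      apply hmaxk
      rw [keys_eq_map_fst]
      exact (mem_msOf_of_pos hpos).mp (by rwa [hqd, dOf] at hy)
    have hcnt : (mOf q).count a = v0.toNat := by
      rw [hqd, dOf]; exact count_msOf hnd hp0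
    -- dict after counts.pop(a)
    have hitems0 : (PySem.Dict.erase d a).items = d.items.filter (fun p => !p.1 == a) := rfl
    have hd0 : dOf (PySem.Dict.erase d a) = mOf q - Multiset.replicate v0.toNat a := by
      rw [hqd, dOf, dOf, hitems0, msOf_erase hnd hp0]
    have hpos0 : ∀ p ∈ (PySem.Dict.erase d a).items, (1:Int) ≤ p.2 := by
      intro p hp
      rw [hitems0] at hp
      exact hpos p (List.mem_of_mem_filter hp)
    have hnd0 : ((PySem.Dict.erase d a).items.map Prod.fst).Nodup := nodup_keys_erase hnd a
    rw [loopB, if_neg (by omega), hmaxeq]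
    dsimp only
    rw [hgetD]
    by_cases hm01 : a = 0 ∨ a = -1
    · rw [if_pos hm01]
      obtain ⟨t, ht⟩ : ∃ t, rem.toNat = t + 1 := ⟨rem.toNat - 1, by omega⟩
      rw [ht]
      exact fixA t x q (mOf q) a rfl hmM hmaxM hm01
    · rw [if_neg hm01]
      by_cases hp1 : (1:Int) ≤ a
      · rw [if_pos hp1]
        by_cases hrc : rem ≤ v0
        · rw [if_pos hrc]
          obtain ⟨q', hq1, -⟩ := bulkA (rem.toNat - 1) 0 x q (mOf q) a rfl hmaxM (by omega) hp1
          rw [show rem.toNat = (rem.toNat - 1) + 1 + 0 from by omega, hq1, loopA]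
        · rw [if_neg hrc]
          obtain ⟨q', hq1, hq2⟩ := bulkA (v0.toNat - 1) (rem - v0).toNat x q (mOf q) a rfl hmaxM (by omega) hp1
          rw [show rem.toNat = (v0.toNat - 1) + 1 + (rem - v0).toNat from by omega, hq1]
          rw [show v0.toNat - 1 + 1 = v0.toNat from by omega] at hq2
          -- the two child inserts
          set d0 := PySem.Dict.erase d a with hd0def
          set g1 := PySem.Int.floordiv a 2 with hg1
          set g2 := PySem.Int.floordiv (a-1) 2 with hg2
          set d1 := PySem.Dict.insert d0 g1 (PySem.Dict.getD d0 g1 0 + v0) with hd1def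
          set d2 := PySem.Dict.insert d1 g2 (PySem.Dict.getD d1 g2 0 + v0) with hd2def
          have hd1 : dOf d1 = dOf d0 + Multiset.replicate v0.toNat g1 :=
            dOf_insert_add hnd0 (fun p hp => le_trans (by omega) (hpos0 p hp)) (by omega)
          have hpos1 : ∀ p ∈ d1.items, (1:Int) ≤ p.2 :=
            items_pos_insert hpos0 (by have := getD_nonneg (fun p hp => le_trans (by omega) (hpos0 p hp)) g1; omega)
          have hnd1 : (d1.items.map Prod.fst).Nodup := by
            rw [← keys_eq_map_fst]
            exact PySem.Dict.nodup_keys_insert _ _ _ (by rwa [keys_eq_map_fst])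
          have hd2 : dOf d2 = dOf d1 + Multiset.replicate v0.toNat g2 :=
            dOf_insert_add hnd1 (fun p hp => le_trans (by omega) (hpos1 p hp)) (by omega)
          have hpos2 : ∀ p ∈ d2.items, (1:Int) ≤ p.2 :=
            items_pos_insert hpos1 (by have := getD_nonneg (fun p hp => le_trans (by omega) (hpos1 p hp)) g2; omega)
          have hnd2 : (d2.items.map Prod.fst).Nodup := by
            rw [← keys_eq_map_fst]
            exact PySem.Dict.nodup_keys_insert _ _ _ (by rwa [keys_eq_map_fst])
          have hne2 : d2.items ≠ [] :=
            List.ne_nil_of_mem (PySem.Dict.mem_items_insert_self d1 g2 _)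
          apply ih (rem - v0) q' d2 v a ⟨?_, hpos2, hne2, hnd2⟩ (by omega) (by omega)
          rw [hq2, hd2, hd1, hd0]
      · rw [if_neg hp1]
        have ha2 : a ≤ -2 := by
          rcases (not_or.mp hm01) with ⟨h1, h2⟩
          omega
        have hha : a < PySem.Int.floordiv a 2 := by
          rcases lt_or_ge (PySem.Int.floordiv a 2) (a+1) with h | h
          · rw [PySem.Int.floordiv_lt_iff_lt_mul (by omega)] at h; omega
          · omega
        obtain ⟨hstep, hms⟩ := stepA (rfl : mOf q = mOf q) hmM hmaxM (rem.toNat - 1) x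
        set g1 := PySem.Int.floordiv a 2 with hg1
        set g2 := PySem.Int.floordiv (a-1) 2 with hg2
        set d0 := PySem.Dict.erase d a with hd0def
        set d1 := (if 1 < v0 then PySem.Dict.insert d0 a (v0-1) else d0) with hd1def
        set d2 := PySem.Dict.insert d1 g1 (PySem.Dict.getD d1 g1 0 + 1) with hd2def
        set d3 := PySem.Dict.insert d2 g2 (PySem.Dict.getD d2 g2 0 + 1) with hd3def
        have hd1 : dOf d1 = dOf d0 + Multiset.replicate (v0-1).toNat a := by
          rw [hd1def]
          by_cases hv2 : 1 < v0
          · rw [if_pos hv2]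
            exact dOf_insert_fresh (by rw [hitems0]; exact not_mem_keys_filter _ _) _
          · rw [if_neg hv2, show ((v0-1).toNat) = 0 from by omega]
            simp
        have hpos1 : ∀ p ∈ d1.items, (1:Int) ≤ p.2 := by
          rw [hd1def]
          by_cases hv2 : 1 < v0
          · rw [if_pos hv2]
            exact items_pos_insert hpos0 (by omega)
          · rw [if_neg hv2]; exact hpos0
        have hnd1 : (d1.items.map Prod.fst).Nodup := by
          rw [hd1def]
          by_cases hv2 : 1 < v0
          · rw [if_pos hv2, ← keys_eq_map_fst]
            exact PySem.Dict.nodup_keys_insert _ _ _ (by rwa [keys_eq_map_fst])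
          · rw [if_neg hv2]; exact hnd0
        have hd2 : dOf d2 = dOf d1 + Multiset.replicate 1 g1 :=
          dOf_insert_add hnd1 (fun p hp => le_trans (by omega) (hpos1 p hp)) (by omega)
        have hpos2 : ∀ p ∈ d2.items, (1:Int) ≤ p.2 :=
          items_pos_insert hpos1 (by have := getD_nonneg (fun p hp => le_trans (by omega) (hpos1 p hp)) g1; omega)
        have hnd2 : (d2.items.map Prod.fst).Nodup := by
          rw [← keys_eq_map_fst]
          exact PySem.Dict.nodup_keys_insert _ _ _ (by rwa [keys_eq_map_fst])
        have hd3 : dOf d3 = dOf d2 + Multiset.replicate 1 g2 :=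
          dOf_insert_add hnd2 (fun p hp => le_trans (by omega) (hpos2 p hp)) (by omega)
        have hpos3 : ∀ p ∈ d3.items, (1:Int) ≤ p.2 :=
          items_pos_insert hpos2 (by have := getD_nonneg (fun p hp => le_trans (by omega) (hpos2 p hp)) g2; omega)
        have hnd3 : (d3.items.map Prod.fst).Nodup := by
          rw [← keys_eq_map_fst]
          exact PySem.Dict.nodup_keys_insert _ _ _ (by rwa [keys_eq_map_fst])
        have hne3 : d3.items ≠ [] :=
          List.ne_nil_of_mem (PySem.Dict.mem_items_insert_self d2 g2 _)
        have hmq' : mOf ((-(PySem.Int.floordiv (a-1) 2)) :: (-(PySem.Int.floordiv a 2)) :: q.erase (-a)) = dOf d3 := by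
          rw [hms, hd3, hd2, hd1, hd0, Multiset.ext]
          intro b
          rw [Multiset.count_add, Multiset.count_add, Multiset.count_add,
            Multiset.count_sub, Multiset.count_cons, Multiset.count_cons]
          simp only [Multiset.count_replicate]
          by_cases hb1 : b = a
          · subst hb1; rw [Multiset.count_erase_self]; split_ifs <;> omega
          · rw [Multiset.count_erase_of_ne hb1]; split_ifs <;> omega
        by_cases hr1 : rem = 1
        · rw [loopB_done f (rem-1) d3 a (by omega)]
          obtain ⟨hstep0, -⟩ := stepA (rfl : mOf q = mOf q) hmM hmaxM 0 x
          rw [show rem.toNat = 0 + 1 from by omega, hstep0, loopA]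
        · rw [show rem.toNat = (rem.toNat - 1) + 1 from by omega, hstep,
            show rem.toNat - 1 = (rem - 1).toNat from by omega]
          exact ih (rem - 1) _ d3 a a ⟨hmq', hpos3, hne3, hnd3⟩ (by omega) (by omega)

-- ===== VERDICT (by name: the statement is the Claim_ definition above) =====
theorem solve_slow_spec : Claim_equal_solve_slow := by
  intro n k _
  unfold Spec_solve_slow solve_slow solve_slow_alt
  by_cases hk : k ≤ 0
  · rw [show k.toNat = 0 from by omega, loopA, loopB_done _ k _ n hk]
  · have hit : (PySem.Dict.ofList [(n, 1)] : PySem.Dict Int Int).items = [(n, 1)] := rfl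
    have hinv : SimInv [-n] (PySem.Dict.ofList [(n, 1)]) := by
      refine ⟨?_, ?_, ?_, ?_⟩
      · rw [mOf, dOf, hit]; simp [msOf]
      · rw [hit]; intro p hp; simp at hp; subst hp; simp
      · rw [hit]; simp
      · rw [hit]; simp
    rw [sim (k.toNat + 1) k [-n] (PySem.Dict.ofList [(n, 1)]) n n hinv (by omega) (by omega)]
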